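-- pv_equiv track=rewrite | github.com/pzy2000/OpenHire | openhire/skill_catalog.py | _parse_simple_frontmatter
-- ===== SOURCE A (Python) =====
-- class SkillPreviewParseError(ValueError):
--     """Raised when SKILL.md frontmatter cannot be parsed into a preview record."""
--
-- def _parse_simple_frontmatter(frontmatter_text: str) -> dict[str, str]:
--     parsed: dict[str, str] = {}
--     current_key: str | None = None
--     multiline_mode: str | None = None
--     for line in frontmatter_text.splitlines():
--         if multiline_mode and line[:1].isspace():
--             stripped = line.strip()
--             if multiline_mode == ">":
--                 if stripped:
--                     parsed[current_key] = (
--                         f"{parsed[current_key]} {stripped}".strip()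
--                         if parsed[current_key]
--                         else stripped
--                     )
--                 elif parsed[current_key]:
--                     parsed[current_key] = f"{parsed[current_key]}\n"
--             else:
--                 parsed[current_key] = (
--                     f"{parsed[current_key]}\n{stripped}" if parsed[current_key] else stripped
--                 )
--             continue
--
--         stripped = line.strip()
--         if not stripped or stripped.startswith("#"):
--             continue
--         if line[:1].isspace():
--             continue
--         if ":" not in stripped:
--             raise SkillPreviewParseError("Unsupported YAML syntax in SKILL.md frontmatter.")
--         key, value = stripped.split(":", 1)
--         key = key.strip()
--         value = value.strip()
--         if not key:
--             raise SkillPreviewParseError("Unsupported YAML syntax in SKILL.md frontmatter.")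
--         if value in {"|", ">"}:
--             parsed[key] = ""
--             current_key = key
--             multiline_mode = value
--             continue
--         if len(value) >= 2 and value[0] == value[-1] and value[0] in {'"', "'"}:
--             value = value[1:-1]
--         parsed[key] = value
--         current_key = key
--         multiline_mode = None
--     return parsed
-- ===== SOURCE B (Python) =====
-- class SkillPreviewParseError(ValueError):
--     """Raised when SKILL.md frontmatter cannot be parsed into a preview record."""
--
--
-- def _parse_simple_frontmatter(frontmatter_text: str) -> dict[str, str]:
--     lines = frontmatter_text.splitlines()
--     parsed: dict[str, str] = {}
--     n = len(lines)
--     i = 0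
--     while i < n:
--         line = lines[i]
--         i += 1
--         stripped = line.strip()
--         if not stripped or line[:1].isspace() or stripped.startswith("#"):
--             continue
--         if ":" not in stripped:
--             raise SkillPreviewParseError("Unsupported YAML syntax in SKILL.md frontmatter.")
--         key, value = stripped.split(":", 1)
--         key = key.strip()
--         value = value.strip()
--         if not key:
--             raise SkillPreviewParseError("Unsupported YAML syntax in SKILL.md frontmatter.")
--         if value in {"|", ">"}:
--             folded = value == ">"
--             acc = ""
--             while i < n:
--                 cont = lines[i]
--                 if cont[:1].isspace():
--                     piece = cont.strip()
--                     if folded: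
--                         if piece:
--                             acc = f"{acc} {piece}".strip() if acc else piece
--                         elif acc:
--                             acc = f"{acc}\n"
--                     else:
--                         acc = f"{acc}\n{piece}" if acc else piece
--                     i += 1
--                     continue
--                 skipped = cont.strip()
--                 if not skipped or skipped.startswith("#"):
--                     i += 1
--                     continue
--                 break
--             parsed[key] = acc
--         else:
--             if len(value) >= 2 and value[0] == value[-1] and value[0] in {'"', "'"}:
--                 value = value[1:-1]
--             parsed[key] = value
--     return parsed
-- ===== Notes on version B (the rewrite author's own statement) =====
-- stated objective: alternative
-- what changed: A's single fold that threads current_key/multiline_mode state flags across every line is re-decomposed into an index-based outer loop over lines with a dedicated inner loop that collects an entire '|'/'>' multiline block (including blank and non-indented comment lines inside it) before storing the key once.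
-- outside the precondition, e.g. on _parse_simple_frontmatter('oops'): A raises SkillPreviewParseError, B raises SkillPreviewParseError; on _parse_simple_frontmatter('|'): A raises SkillPreviewParseError, B raises SkillPreviewParseError; on _parse_simple_frontmatter('>'): A raises SkillPreviewParseError, B raises SkillPreviewParseError
import Mathlib
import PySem

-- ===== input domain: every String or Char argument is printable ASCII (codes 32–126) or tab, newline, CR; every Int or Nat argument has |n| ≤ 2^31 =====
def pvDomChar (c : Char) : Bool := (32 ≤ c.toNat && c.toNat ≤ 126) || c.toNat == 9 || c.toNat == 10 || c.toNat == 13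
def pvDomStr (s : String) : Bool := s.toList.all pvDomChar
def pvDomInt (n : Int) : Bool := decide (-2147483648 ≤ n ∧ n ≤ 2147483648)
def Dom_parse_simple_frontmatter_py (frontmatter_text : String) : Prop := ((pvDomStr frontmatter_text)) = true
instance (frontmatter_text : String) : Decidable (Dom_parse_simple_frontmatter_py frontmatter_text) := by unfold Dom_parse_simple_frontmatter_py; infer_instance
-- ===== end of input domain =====

-- B re-decomposes A's state machine (one fold carrying current_key/multiline_mode) into an outer
-- line loop with a dedicated inner loop that collects a whole multiline block before storing it;
-- objective: alternative decomposition, same cost. Return-value equivalence only (no mutation).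

-- string concatenation on the transparent List Char representation (f-string pieces)
def pvCat (a b : String) : String := String.ofList (a.toList ++ b.toList)

-- line[:1].isspace()
def pvFirstIsSpace (line : String) : Bool :=
  PySem.Str.strIsspace (PySem.Str.slice line none (some 1))

-- `key, value = stripped.split(":", 1)` then `.strip()`: when ':' occurs in s the split has exactly
-- two parts, so the `getD` defaults are unreachable (both Pythons do this unpacking identically)
def pvKeyOf (s : String) : String :=
  PySem.Str.strip (((PySem.Str.splitMax? s ":" 1).getD []).getD 0 "")
def pvValOf (s : String) : String :=
  PySem.Str.strip (((PySem.Str.splitMax? s ":" 1).getD []).getD 1 "")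

-- `if len(value) >= 2 and value[0] == value[-1] and value[0] in {'"', "'"}: value = value[1:-1]`
def pvUnquote (value : String) : String :=
  if 2 ≤ PySem.Str.len value ∧
      PySem.Str.pyGet? value 0 = PySem.Str.pyGet? value (-1) ∧
      (PySem.Str.pyGet? value 0 = some '"' ∨ PySem.Str.pyGet? value 0 = some '\'') then
    PySem.Str.slice value (some 1) (some (-1))
  else value

-- ===== PORT A =====
-- the for-loop of A as structural recursion over the lines, carrying (parsed, current_key, multiline_mode)
def pvLoopA (parsed : PySem.Dict String String) (current_key multiline_mode : Option String) :
    List String → PySem.Dict String String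
  | [] => parsed
  | line :: rest =>
    if multiline_mode.isSome && pvFirstIsSpace line then
      -- current_key is always `some _` when multiline_mode is: the `getD ""` default is unreachable
      if multiline_mode == some ">" then
        if PySem.Str.strip line ≠ "" then
          pvLoopA (parsed.insert (current_key.getD "")
              (if parsed.getD (current_key.getD "") "" ≠ ""
               then PySem.Str.strip (pvCat (pvCat (parsed.getD (current_key.getD "") "") " ") (PySem.Str.strip line))
               else PySem.Str.strip line))
            current_key multiline_mode rest
        else if parsed.getD (current_key.getD "") "" ≠ "" then
          pvLoopA (parsed.insert (current_key.getD "") (pvCat (parsed.getD (current_key.getD "") "") "\n"))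
            current_key multiline_mode rest
        else
          pvLoopA parsed current_key multiline_mode rest
      else
        pvLoopA (parsed.insert (current_key.getD "")
            (if parsed.getD (current_key.getD "") "" ≠ ""
             then pvCat (pvCat (parsed.getD (current_key.getD "") "") "\n") (PySem.Str.strip line)
             else PySem.Str.strip line))
          current_key multiline_mode rest
    else
      if PySem.Str.strip line = "" || PySem.Str.startswith (PySem.Str.strip line) "#" then
        pvLoopA parsed current_key multiline_mode rest
      else if pvFirstIsSpace line then
        pvLoopA parsed current_key multiline_mode rest
      else if ¬ PySem.Str.isIn ":" (PySem.Str.strip line) then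
        pvLoopA parsed current_key multiline_mode rest  -- Python raises SkillPreviewParseError here (excluded by Pre_)
      else if pvKeyOf (PySem.Str.strip line) = "" then
        pvLoopA parsed current_key multiline_mode rest  -- Python raises SkillPreviewParseError here (excluded by Pre_)
      else if pvValOf (PySem.Str.strip line) = "|" ∨ pvValOf (PySem.Str.strip line) = ">" then
        pvLoopA (parsed.insert (pvKeyOf (PySem.Str.strip line)) "")
          (some (pvKeyOf (PySem.Str.strip line))) (some (pvValOf (PySem.Str.strip line))) rest
      else
        pvLoopA (parsed.insert (pvKeyOf (PySem.Str.strip line)) (pvUnquote (pvValOf (PySem.Str.strip line))))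
          (some (pvKeyOf (PySem.Str.strip line))) none rest

def parse_simple_frontmatter_py (frontmatter_text : String) : List (String × String) :=
  (pvLoopA PySem.Dict.empty none none (PySem.Str.splitlines frontmatter_text)).items

-- ===== PORT B =====
-- inner while-loop of B: consume a multiline block, returning (collected value, unconsumed lines)
def pvMulti (folded : Bool) (acc : String) : List String → String × List String
  | [] => (acc, [])
  | cont :: rest =>
    if pvFirstIsSpace cont then
      pvMulti folded
        (if folded then
          if PySem.Str.strip cont ≠ "" then
            (if acc ≠ "" then PySem.Str.strip (pvCat (pvCat acc " ") (PySem.Str.strip cont))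
             else PySem.Str.strip cont)
          else if acc ≠ "" then pvCat acc "\n" else acc
         else
          (if acc ≠ "" then pvCat (pvCat acc "\n") (PySem.Str.strip cont)
           else PySem.Str.strip cont))
        rest
    else
      if PySem.Str.strip cont = "" || PySem.Str.startswith (PySem.Str.strip cont) "#" then
        pvMulti folded acc rest
      else
        (acc, cont :: rest)

-- termination measure for pvLoopB (cited by its decreasing_by)
theorem pvMulti_len (folded : Bool) (acc : String) (l : List String) :
    (pvMulti folded acc l).2.length ≤ l.length := by
  induction l generalizing acc with
  | nil => simp [pvMulti]
  | cons c rest ih =>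
    simp only [pvMulti]
    split_ifs <;> first | exact le_trans (ih _) (Nat.le_succ _) | simp

-- outer loop of B: walk the lines, storing each key's value once
set_option maxHeartbeats 1000000 in
def pvLoopB (parsed : PySem.Dict String String) : List String → PySem.Dict String String
  | [] => parsed
  | line :: rest =>
    if PySem.Str.strip line = "" || pvFirstIsSpace line ||
        PySem.Str.startswith (PySem.Str.strip line) "#" then
      pvLoopB parsed rest
    else if ¬ PySem.Str.isIn ":" (PySem.Str.strip line) then
      pvLoopB parsed rest  -- Source B raises SkillPreviewParseError here (excluded by Pre_)
    else if pvKeyOf (PySem.Str.strip line) = "" then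
      pvLoopB parsed rest  -- Source B raises SkillPreviewParseError here (excluded by Pre_)
    else if pvValOf (PySem.Str.strip line) = "|" ∨ pvValOf (PySem.Str.strip line) = ">" then
      pvLoopB (parsed.insert (pvKeyOf (PySem.Str.strip line))
          (pvMulti (pvValOf (PySem.Str.strip line) == ">") "" rest).1)
        (pvMulti (pvValOf (PySem.Str.strip line) == ">") "" rest).2
    else
      pvLoopB (parsed.insert (pvKeyOf (PySem.Str.strip line)) (pvUnquote (pvValOf (PySem.Str.strip line)))) rest
  termination_by l => l.length
  decreasing_by
  all_goals simp only [List.length_cons]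
  all_goals first
    | omega
    | exact Nat.lt_succ_of_le (pvMulti_len _ _ _)

def parse_simple_frontmatter_py_alt (frontmatter_text : String) : List (String × String) :=
  (pvLoopB PySem.Dict.empty (PySem.Str.splitlines frontmatter_text)).items

-- ===== PRECONDITION & SPEC =====
-- a key line (non-blank, first char not whitespace, not a comment) must contain ':' with a non-empty key;
-- otherwise Python raises SkillPreviewParseError
def pvLineOk (line : String) : Bool :=
  if PySem.Str.strip line = "" || pvFirstIsSpace line ||
      PySem.Str.startswith (PySem.Str.strip line) "#" then
    true
  else
    PySem.Str.isIn ":" (PySem.Str.strip line) && (pvKeyOf (PySem.Str.strip line) ≠ "")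

-- Pre_ excludes exactly the inputs on which A raises SkillPreviewParseError (a key line without ':' or with an empty key)
def Pre_parse_simple_frontmatter_py (frontmatter_text : String) : Prop :=
  ∀ line ∈ PySem.Str.splitlines frontmatter_text, pvLineOk line = true
instance (frontmatter_text : String) : Decidable (Pre_parse_simple_frontmatter_py frontmatter_text) := by
  unfold Pre_parse_simple_frontmatter_py; infer_instance

def pvWitness_parse_simple_frontmatter_py : String :=
  "name: demo\ndesc: >\n  a b\n\n  c\n# note\nbody: |\n  x\n  y\nq: 'v'"

def Spec_parse_simple_frontmatter_py (frontmatter_text : String) (out : List (String × String)) : Prop :=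
  out = parse_simple_frontmatter_py_alt frontmatter_text
instance (frontmatter_text : String) (out : List (String × String)) : Decidable (Spec_parse_simple_frontmatter_py frontmatter_text out) := by
  unfold Spec_parse_simple_frontmatter_py; infer_instance

-- ===== CLAIM (what is proved, stated in full; the proofs are below) =====
def Claim_equal_parse_simple_frontmatter_py : Prop :=
  ∀ (frontmatter_text : String), Dom_parse_simple_frontmatter_py frontmatter_text →
    Pre_parse_simple_frontmatter_py frontmatter_text →
    Spec_parse_simple_frontmatter_py frontmatter_text (parse_simple_frontmatter_py frontmatter_text)

-- ===== LEMMAS AND PROOFS =====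

theorem pvWitness_ok :
    Dom_parse_simple_frontmatter_py pvWitness_parse_simple_frontmatter_py ∧
    Pre_parse_simple_frontmatter_py pvWitness_parse_simple_frontmatter_py := by
  constructor <;> decide

-- a key line is processed identically by A (from any state whose continuation guard is off) and by B
theorem pvKeyStep (line : String) (rest : List String)
    (hfs : pvFirstIsSpace line = false)
    (hse : ¬ PySem.Str.strip line = "")
    (hcm : PySem.Str.startswith (PySem.Str.strip line) "#" = false)
    (hline : pvLineOk line = true)
    (ih1 : ∀ (d : PySem.Dict String String) (ck : Option String), pvLoopA d ck none rest = pvLoopB d rest)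
    (ih2 : ∀ (d : PySem.Dict String String) (k acc m : String),
      pvLoopA (d.insert k acc) (some k) (some m) rest =
        pvLoopB (d.insert k (pvMulti (m == ">") acc rest).1) (pvMulti (m == ">") acc rest).2)
    (parsed : PySem.Dict String String) (ck mm : Option String) :
    pvLoopA parsed ck mm (line :: rest) = pvLoopB parsed (line :: rest) := by
  simp only [pvLineOk, hfs, hse, hcm] at hline
  rw [if_neg (by simp)] at hline
  rw [Bool.and_eq_true] at hline
  obtain ⟨hIn, hk⟩ := hline
  rw [decide_eq_true_eq] at hk
  rw [pvLoopA, pvLoopB]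
  simp only [hfs, Bool.and_false, Bool.false_eq_true, if_false, hse, hcm, decide_false,
    Bool.or_self, hIn, not_true]
  rw [if_neg hk, if_neg hk]
  by_cases hv : pvValOf (PySem.Str.strip line) = "|" ∨ pvValOf (PySem.Str.strip line) = ">"
  · rw [if_pos hv, if_pos hv]
    exact ih2 parsed (pvKeyOf (PySem.Str.strip line)) "" (pvValOf (PySem.Str.strip line))
  · rw [if_neg hv, if_neg hv]
    exact ih1 _ (some (pvKeyOf (PySem.Str.strip line)))

-- the heart: on lines all satisfying pvLineOk, A's state machine equals B's two nested loops
theorem pvMain (lines : List String) (hok : ∀ l ∈ lines, pvLineOk l = true) :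
    (∀ (d : PySem.Dict String String) (ck : Option String),
      pvLoopA d ck none lines = pvLoopB d lines) ∧
    (∀ (d : PySem.Dict String String) (k acc m : String),
      pvLoopA (d.insert k acc) (some k) (some m) lines =
        pvLoopB (d.insert k (pvMulti (m == ">") acc lines).1) (pvMulti (m == ">") acc lines).2) := by
  induction lines with
  | nil =>
    refine ⟨fun d ck => ?_, fun d k acc m => ?_⟩ <;> simp [pvLoopA, pvMulti] <;> rw [pvLoopB]
  | cons line rest ih =>
    have hline := hok line (by simp)
    have hrest : ∀ l ∈ rest, pvLineOk l = true := fun l hl => hok l (by simp [hl])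
    obtain ⟨ih1, ih2⟩ := ih hrest
    refine ⟨?_, ?_⟩
    · intro d ck
      by_cases hfs : pvFirstIsSpace line = true
      · rw [pvLoopA, pvLoopB]
        simp only [Option.isSome_none, Bool.false_and, Bool.false_eq_true, if_false, hfs,
          Bool.or_true, Bool.true_or, if_true]
        split_ifs <;> exact ih1 d ck
      · rw [Bool.not_eq_true] at hfs
        by_cases hse : PySem.Str.strip line = ""
        · rw [pvLoopA, pvLoopB]
          simp only [Option.isSome_none, Bool.false_and, Bool.false_eq_true, if_false, hse,
            decide_true, Bool.true_or, if_true]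
          exact ih1 d ck
        · by_cases hcm : PySem.Str.startswith (PySem.Str.strip line) "#" = true
          · rw [pvLoopA, pvLoopB]
            simp only [Option.isSome_none, Bool.false_and, Bool.false_eq_true, if_false, hcm,
              Bool.or_true, if_true]
            exact ih1 d ck
          · rw [Bool.not_eq_true] at hcm
            exact pvKeyStep line rest hfs hse hcm hline ih1 ih2 d ck none
    · intro d k acc m
      by_cases hfs : pvFirstIsSpace line = true
      · -- continuation line
        rw [pvLoopA]
        conv_rhs => rw [pvMulti]
        simp only [Option.isSome_some, Bool.true_and, hfs, if_true, Option.getD_some,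
          PySem.Dict.getD_insert_self, PySem.Dict.insert_insert_self]
        have hbeq : (some m == some ">") = (m == ">") := by simp
        rw [hbeq]
        by_cases hm : (m == ">") = true
        · simp only [if_pos hm]
          by_cases hstr : PySem.Str.strip line ≠ ""
          · simp only [if_pos hstr]
            by_cases hacc : acc ≠ ""
            · simp only [if_pos hacc]
              exact ih2 d k _ m
            · simp only [if_neg hacc]
              exact ih2 d k _ m
          · simp only [if_neg hstr]
            by_cases hacc : acc ≠ ""
            · simp only [if_pos hacc]
              exact ih2 d k _ m
            · simp only [if_neg hacc]
              exact ih2 d k acc m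
        · simp only [if_neg hm]
          by_cases hacc : acc ≠ ""
          · simp only [if_pos hacc]
            exact ih2 d k _ m
          · simp only [if_neg hacc]
            exact ih2 d k _ m
      · rw [Bool.not_eq_true] at hfs
        by_cases hse : PySem.Str.strip line = ""
        · rw [pvLoopA]
          conv_rhs => rw [pvMulti]
          simp only [hfs, Bool.and_false, Bool.false_eq_true, if_false, hse, decide_true,
            Bool.true_or, if_true]
          exact ih2 d k acc m
        · by_cases hcm : PySem.Str.startswith (PySem.Str.strip line) "#" = true
          · rw [pvLoopA]
            conv_rhs => rw [pvMulti]
            simp only [hfs, Bool.and_false, Bool.false_eq_true, if_false, hcm, Bool.or_true,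
              if_true, hse, decide_false]
            exact ih2 d k acc m
          · rw [Bool.not_eq_true] at hcm
            have hmulti : pvMulti (m == ">") acc (line :: rest) = (acc, line :: rest) := by
              have hcm' : PySem.Chars.startswith (PySem.Chars.strip line.toList) ['#'] = false := by
                simpa using hcm
              rw [pvMulti, if_neg (by simp [hfs]), if_neg (by simp [hse, hcm'])]
            rw [hmulti]
            exact pvKeyStep line rest hfs hse hcm hline ih1 ih2 (d.insert k acc) (some k) (some m)

-- ===== VERDICT (by name: the statement is the Claim_ definition above) =====
theorem parse_simple_frontmatter_py_spec : Claim_equal_parse_simple_frontmatter_py := by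
  intro t _ hpre
  unfold Spec_parse_simple_frontmatter_py parse_simple_frontmatter_py parse_simple_frontmatter_py_alt
  rw [(pvMain (PySem.Str.splitlines t) hpre).1]
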